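-- pv_equiv track=rewrite | github.com/nwcol/bgshr | bgshr/Inference.py | num_diff_same
-- ===== SOURCE A (Python) =====
-- def num_diff_same(counts):
--     nT = sum(counts) * (sum(counts) - 1) // 2
--     if len(counts) == 1:
--         return [0, nT]
--     else:
--         nS = sum([c * (c - 1) // 2 for c in counts])
--         nD = nT - nS
--         return [nD, nS]
-- ===== SOURCE B (Python) =====
-- def num_diff_same(counts):
--     nD = nS = run = 0
--     for c in counts:
--         nD += c * run
--         nS += c * (c - 1) // 2
--         run += c
--     return [nD, nS]
-- ===== Notes on version B (the rewrite author's own statement) =====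
-- stated objective: simpler
-- what changed: Single fold with a running sum of previously seen counts: nD is accumulated directly as the cross-category pair sum (c*running) instead of by subtraction nT - nS, and the redundant len==1 branch disappears.
import Mathlib
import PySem

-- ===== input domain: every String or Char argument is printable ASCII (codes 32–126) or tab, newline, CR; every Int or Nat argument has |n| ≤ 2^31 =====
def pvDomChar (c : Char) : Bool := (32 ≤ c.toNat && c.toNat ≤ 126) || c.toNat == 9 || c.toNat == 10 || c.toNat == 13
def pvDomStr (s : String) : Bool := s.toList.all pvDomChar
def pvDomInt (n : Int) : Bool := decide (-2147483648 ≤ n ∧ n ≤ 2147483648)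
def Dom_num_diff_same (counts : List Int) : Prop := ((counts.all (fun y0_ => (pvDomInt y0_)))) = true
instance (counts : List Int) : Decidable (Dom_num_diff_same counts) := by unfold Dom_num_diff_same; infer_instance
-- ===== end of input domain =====

-- B replaces A's nT − nS subtraction by a single fold accumulating the cross-category pair sum directly (objective: simpler).

-- ===== PORT A =====
def num_diff_same (counts : List Int) : List Int :=
  let nT := PySem.Int.floordiv (counts.sum * (counts.sum - 1)) 2
  if counts.length == 1 then [0, nT]
  else
    let nS := (counts.map (fun c => PySem.Int.floordiv (c * (c - 1)) 2)).sum
    let nD := nT - nS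
    [nD, nS]

-- ===== PORT B =====
def num_diff_same_alt (counts : List Int) : List Int :=
  let r := counts.foldl
    (fun (st : Int × Int × Int) c =>
      (st.1 + c * st.2.2, st.2.1 + PySem.Int.floordiv (c * (c - 1)) 2, st.2.2 + c))
    (0, 0, 0)
  [r.1, r.2.1]

-- ===== PRECONDITION & SPEC =====
def Spec_num_diff_same (counts : List Int) (out : List Int) : Prop := out = num_diff_same_alt counts
instance (counts : List Int) (out : List Int) : Decidable (Spec_num_diff_same counts out) := by unfold Spec_num_diff_same; infer_instance

-- ===== CLAIM (what is proved, stated in full; the proofs are below) =====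
def Claim_equal_num_diff_same : Prop := ∀ (counts : List Int), Dom_num_diff_same counts → Spec_num_diff_same counts (num_diff_same counts)

-- ===== LEMMAS AND PROOFS =====

-- triangular helper: t n = n*(n-1)//2
def pvT (n : Int) : Int := PySem.Int.floordiv (n * (n - 1)) 2

-- sum of cross-category products Σ_{i<j} c_i c_j
def pvCross : List Int → Int
  | [] => 0
  | c :: tl => c * tl.sum + pvCross tl

theorem pvT_add (a b : Int) : pvT (a + b) = pvT a + pvT b + a * b := by
  obtain ⟨k, hk⟩ := Int.even_mul_succ_self (a + b - 1)
  obtain ⟨ka, hka⟩ := Int.even_mul_succ_self (a - 1)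
  obtain ⟨kb, hkb⟩ := Int.even_mul_succ_self (b - 1)
  have e1 : (a + b) * (a + b - 1) = k + k := by rw [← hk]; ring
  have e2 : a * (a - 1) = ka + ka := by rw [← hka]; ring
  have e3 : b * (b - 1) = kb + kb := by rw [← hkb]; ring
  unfold pvT
  rw [PySem.Int.floordiv_eq_ediv_of_pos (by norm_num),
      PySem.Int.floordiv_eq_ediv_of_pos (by norm_num),
      PySem.Int.floordiv_eq_ediv_of_pos (by norm_num), e1, e2, e3]
  have hk2 : k + k = (ka + ka) + (kb + kb) + 2 * (a * b) := by
    have : a * (a - 1) + b * (b - 1) + 2 * (a * b) = (a + b) * (a + b - 1) := by ring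
    omega
  have d1 : (k + k) / 2 = k := by omega
  have d2 : (ka + ka) / 2 = ka := by omega
  have d3 : (kb + kb) / 2 = kb := by omega
  rw [d1, d2, d3]; omega

theorem pvT_sum (l : List Int) : pvT l.sum = (l.map pvT).sum + pvCross l := by
  induction l with
  | nil => simp [pvT, pvCross, PySem.Int.floordiv]
  | cons c tl ih =>
      simp only [List.sum_cons, List.map_cons, pvCross, pvT_add, ih]
      ring

theorem pv_fold_inv (l : List Int) : ∀ (d s r : Int),
    l.foldl (fun (st : Int × Int × Int) c =>
      (st.1 + c * st.2.2, st.2.1 + PySem.Int.floordiv (c * (c - 1)) 2, st.2.2 + c)) (d, s, r)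
    = (d + r * l.sum + pvCross l, s + (l.map pvT).sum, r + l.sum) := by
  induction l with
  | nil => intro d s r; simp [pvCross]
  | cons c tl ih =>
      intro d s r
      simp only [List.foldl_cons, List.sum_cons, List.map_cons, List.sum_cons, pvCross, ih]
      refine Prod.ext ?_ (Prod.ext ?_ ?_) <;> simp [pvT] <;> ring

-- ===== VERDICT (by name: the statement is the Claim_ definition above) =====
theorem num_diff_same_spec : Claim_equal_num_diff_same := by
  intro counts _
  show num_diff_same counts = num_diff_same_alt counts
  unfold num_diff_same num_diff_same_alt
  rw [pv_fold_inv]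
  have hts := pvT_sum counts
  simp only [pvT] at hts
  simp only [zero_add, zero_mul]
  split
  · next h =>
      match counts, h with
      | [c], _ => simp [pvCross, pvT]
  · simp only [show (fun c : Int => PySem.Int.floordiv (c * (c - 1)) 2) = pvT from rfl,
      List.cons.injEq, and_true]
    rw [hts]; ring
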